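-- pv_equiv track=rewrite | github.com/beimnet777/A2SV | Maximum_scroe_from_removing_stones.py | maximumScore
-- ===== SOURCE A (Python) =====
-- def maximumScore(a: int, b: int, c: int) -> int:
--     ans=0
--     while (a>0 and b>0) or (b>0 and c>0) or (a>0 and c>0):
--         if a==min(a,b,c):
--             b-=1
--             c-=1
--         elif b==min(a,b,c):
--             a-=1
--             c-=1
--         else:
--             a-=1
--             b-=1
--         ans+=1
--     return ans
-- ===== SOURCE B (Python) =====
-- def maximumScore(a: int, b: int, c: int) -> int:
--     # Closed form: clamp negatives to 0; if the largest pile exceeds the other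
--     # two combined the answer is the sum of the other two, else total//2.
--     x, y, z = max(a, 0), max(b, 0), max(c, 0)
--     t = x + y + z
--     m = max(x, y, z)
--     if 2 * m > t:
--         return t - m
--     return t // 2
-- ===== Notes on version B (the rewrite author's own statement) =====
-- stated objective: faster
-- what changed: Replaces A's one-step-at-a-time simulation loop with an O(1) closed form: clamp negatives to 0, then answer is sum-of-two-smaller if the largest pile dominates, else total//2.
import Mathlib
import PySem

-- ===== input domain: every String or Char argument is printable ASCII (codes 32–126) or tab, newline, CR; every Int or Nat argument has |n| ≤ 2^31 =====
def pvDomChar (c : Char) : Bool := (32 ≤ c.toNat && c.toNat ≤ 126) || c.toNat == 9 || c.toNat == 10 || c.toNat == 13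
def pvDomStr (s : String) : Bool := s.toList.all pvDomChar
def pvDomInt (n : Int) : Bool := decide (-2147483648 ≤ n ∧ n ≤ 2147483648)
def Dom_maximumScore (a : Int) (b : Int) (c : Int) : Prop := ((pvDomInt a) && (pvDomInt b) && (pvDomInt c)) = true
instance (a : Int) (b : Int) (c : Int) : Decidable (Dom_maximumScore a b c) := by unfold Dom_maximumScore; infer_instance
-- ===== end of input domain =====

-- B: O(1) closed form (clamp-then-formula) replacing A's step-by-step simulation loop.

-- ===== PORT A =====
-- literal port of A's while loop; the fuel argument only makes the recursion total
-- (each iteration removes one stone from each of two positive piles, so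
-- (max a 0 + max b 0 + max c 0) iterations always suffice)
def msLoop : Nat → Int → Int → Int → Int → Int
  | 0, _, _, _, ans => ans
  | fuel + 1, a, b, c, ans =>
    if (a > 0 ∧ b > 0) ∨ (b > 0 ∧ c > 0) ∨ (a > 0 ∧ c > 0) then
      if a = min a (min b c) then msLoop fuel a (b - 1) (c - 1) (ans + 1)
      else if b = min a (min b c) then msLoop fuel (a - 1) b (c - 1) (ans + 1)
      else msLoop fuel (a - 1) (b - 1) c (ans + 1)
    else ans

def maximumScore (a : Int) (b : Int) (c : Int) : Int :=
  msLoop (max a 0 + max b 0 + max c 0).toNat a b c 0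

-- ===== PORT B =====
def maximumScore_alt (a : Int) (b : Int) (c : Int) : Int :=
  let x := max a 0
  let y := max b 0
  let z := max c 0
  let t := x + y + z
  let m := max x (max y z)
  if 2 * m > t then t - m else PySem.Int.floordiv t 2

-- ===== PRECONDITION & SPEC =====
def Spec_maximumScore (a : Int) (b : Int) (c : Int) (out : Int) : Prop := out = maximumScore_alt a b c
instance (a : Int) (b : Int) (c : Int) (out : Int) : Decidable (Spec_maximumScore a b c out) := by unfold Spec_maximumScore; infer_instance

-- ===== CLAIM (what is proved, stated in full; the proofs are below) =====
def Claim_equal_maximumScore : Prop := ∀ (a : Int) (b : Int) (c : Int), Dom_maximumScore a b c → Spec_maximumScore a b c (maximumScore a b c)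

-- ===== LEMMAS AND PROOFS =====
-- the closed form on already-clamped piles
def F (x y z : Int) : Int :=
  if 2 * max x (max y z) > x + y + z then (x + y + z) - max x (max y z)
  else PySem.Int.floordiv (x + y + z) 2

theorem alt_eq_F (a b c : Int) :
    maximumScore_alt a b c = F (max a 0) (max b 0) (max c 0) := by
  simp only [maximumScore_alt, F]

theorem F_s12 (x y z : Int) : F x y z = F y x z := by
  unfold F
  rw [max_left_comm, show x + y + z = y + x + z from by ring]

theorem F_s23 (x y z : Int) : F x y z = F x z y := by
  unfold F
  rw [max_comm y z, show x + y + z = x + z + y from by ring]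

theorem F_step (x y z : Int) (_hx : 0 ≤ x) (hy : 0 < y) (hz : 0 < z)
    (hxy : x ≤ y) (hxz : x ≤ z) : F x y z = 1 + F x (y - 1) (z - 1) := by
  unfold F
  rw [PySem.Int.floordiv_eq_ediv_of_pos (by norm_num : (0:Int) < 2),
      PySem.Int.floordiv_eq_ediv_of_pos (by norm_num : (0:Int) < 2)]
  omega

theorem F_zero (a b c : Int)
    (h : ¬ ((a > 0 ∧ b > 0) ∨ (b > 0 ∧ c > 0) ∨ (a > 0 ∧ c > 0))) :
    F (max a 0) (max b 0) (max c 0) = 0 := by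
  unfold F
  rw [PySem.Int.floordiv_eq_ediv_of_pos (by norm_num : (0:Int) < 2)]
  omega

theorem msLoop_eq (n : Nat) : ∀ a b c ans : Int,
    max a 0 + max b 0 + max c 0 ≤ 2 * n →
    msLoop n a b c ans = ans + maximumScore_alt a b c := by
  induction n with
  | zero =>
    intro a b c ans h
    rw [msLoop, alt_eq_F, F_zero a b c (by omega)]
    ring
  | succ n ih =>
    intro a b c ans h
    by_cases hc : (a > 0 ∧ b > 0) ∨ (b > 0 ∧ c > 0) ∨ (a > 0 ∧ c > 0)
    · rw [msLoop, if_pos hc]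
      by_cases h1 : a = min a (min b c)
      · have hb : 0 < b := by omega
        have hcc : 0 < c := by omega
        rw [if_pos h1, ih a (b - 1) (c - 1) (ans + 1) (by omega),
            alt_eq_F, alt_eq_F,
            show max (b - 1) 0 = max b 0 - 1 from by omega,
            show max (c - 1) 0 = max c 0 - 1 from by omega,
            F_step (max a 0) (max b 0) (max c 0) (by omega) (by omega) (by omega)
              (by omega) (by omega)]
        ring
      · by_cases h2 : b = min a (min b c)
        · have ha : 0 < a := by omega
          have hcc : 0 < c := by omega
          rw [if_neg h1, if_pos h2, ih (a - 1) b (c - 1) (ans + 1) (by omega),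
              alt_eq_F, alt_eq_F,
              show max (a - 1) 0 = max a 0 - 1 from by omega,
              show max (c - 1) 0 = max c 0 - 1 from by omega,
              F_s12 (max a 0 - 1) (max b 0) (max c 0 - 1),
              F_s12 (max a 0) (max b 0) (max c 0),
              F_step (max b 0) (max a 0) (max c 0) (by omega) (by omega) (by omega)
                (by omega) (by omega)]
          ring
        · have ha : 0 < a := by omega
          have hb : 0 < b := by omega
          rw [if_neg h1, if_neg h2, ih (a - 1) (b - 1) c (ans + 1) (by omega),
              alt_eq_F, alt_eq_F,
              show max (a - 1) 0 = max a 0 - 1 from by omega,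
              show max (b - 1) 0 = max b 0 - 1 from by omega,
              F_s23 (max a 0 - 1) (max b 0 - 1) (max c 0),
              F_s12 (max a 0 - 1) (max c 0) (max b 0 - 1),
              F_s23 (max a 0) (max b 0) (max c 0),
              F_s12 (max a 0) (max c 0) (max b 0),
              F_step (max c 0) (max a 0) (max b 0) (by omega) (by omega) (by omega)
                (by omega) (by omega)]
          ring
    · rw [msLoop, if_neg hc, alt_eq_F, F_zero a b c hc]
      ring

-- ===== VERDICT (by name: the statement is the Claim_ definition above) =====
theorem maximumScore_spec : Claim_equal_maximumScore := by
  intro a b c _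
  unfold Spec_maximumScore maximumScore
  simpa using msLoop_eq (max a 0 + max b 0 + max c 0).toNat a b c 0 (by omega)
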